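-- pv_equiv track=rewrite | github.com/zenokoller/sequence | scripts/experiment/influx_utils.py | reordering_extents
-- ===== SOURCE A (Python) =====
-- from typing import Iterable, Set, Dict, List
--
-- def reordering_extents(seq_nrs: List[int]) -> Dict[int, int]:
--     extents = {}
--     next = seq_nrs[0] + 1
--     missing = {}
--     for i, seq_nr in enumerate(seq_nrs[1:]):
--         if next < seq_nr:
--             for j in range(next, seq_nr):
--                 missing[j] = i
--             next = seq_nr + 1
--         else:
--             if seq_nr in missing:
--                 extents[seq_nr] = i - missing[seq_nr]
--                 del missing[seq_nr]
--             else: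
--                 next = seq_nr + 1
--
--     return extents
-- ===== SOURCE B (Python) =====
-- def reordering_extents(seq_nrs):
--     # Missing numbers are kept as whole intervals (newest first) instead of
--     # enumerating every number in a gap, so huge gaps cost O(1) to record.
--     extents = {}
--     nxt = seq_nrs[0] + 1
--     intervals = []  # list of (lo, hi, idx): numbers lo..hi-1 went missing at idx; newest first
--     for i, s in enumerate(seq_nrs[1:]):
--         if nxt < s:
--             intervals.insert(0, (nxt, s, i))
--             nxt = s + 1
--         else:
--             hit = None
--             for (lo, hi, v) in intervals:
--                 if lo <= s < hi:
--                     hit = v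
--                     break
--             if hit is None:
--                 nxt = s + 1
--             else:
--                 extents[s] = i - hit
--                 pruned = []
--                 for (lo, hi, v) in intervals:
--                     if lo <= s < hi:
--                         if lo < s:
--                             pruned.append((lo, s, v))
--                         if s + 1 < hi:
--                             pruned.append((s + 1, hi, v))
--                     else:
--                         pruned.append((lo, hi, v))
--                 intervals = pruned
--     return extents
-- ===== Notes on version B (the rewrite author's own statement) =====
-- stated objective: alternative
-- what changed: A records every individual missing sequence number in a dict by enumerating each gap (cost proportional to the total gap size); B records each gap as a single (lo, hi, index) interval in a newest-first interval list, finding a reordered packet's gap by scanning the intervals and splitting the containing interval, so the size of the gaps never matters.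
import Mathlib
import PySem

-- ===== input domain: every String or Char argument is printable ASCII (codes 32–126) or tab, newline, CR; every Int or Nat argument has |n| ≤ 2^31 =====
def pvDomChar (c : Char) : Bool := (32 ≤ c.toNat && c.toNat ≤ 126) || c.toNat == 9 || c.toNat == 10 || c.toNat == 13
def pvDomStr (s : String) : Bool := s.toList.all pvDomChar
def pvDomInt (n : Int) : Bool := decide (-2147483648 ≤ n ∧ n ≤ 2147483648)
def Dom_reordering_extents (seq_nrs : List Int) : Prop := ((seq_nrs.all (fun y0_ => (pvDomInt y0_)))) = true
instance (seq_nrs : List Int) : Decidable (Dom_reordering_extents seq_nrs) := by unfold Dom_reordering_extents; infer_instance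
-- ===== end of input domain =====

-- B replaces A's dict of every individual missing sequence number (gaps enumerated
-- element by element) with a list of missing INTERVALS, recorded in O(1) per gap.
-- Equivalence of the RETURN value is proved on nonempty inputs (A raises IndexError on []).

-- ===== PORT A =====
-- Python's dict 'missing' is only ever used for membership / lookup / delete (never
-- iterated), so it is ported as a hash map — the exact same operations, hash-backed
-- like CPython's dict, which keeps the port evaluable when gaps are large.
def pvStepA (st : PySem.Dict Int Int × Int × Std.HashMap Int Int) (p : Int × Int) :
    PySem.Dict Int Int × Int × Std.HashMap Int Int :=
  let extents := st.1
  let next := st.2.1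
  let missing := st.2.2
  let i := p.1
  let s := p.2
  if next < s then
    (extents, s + 1, (PySem.List.pyRange next s 1).foldl (fun m j => m.insert j i) missing)
  else if missing.contains s then
    (extents.insert s (i - missing.getD s 0), next, missing.erase s)
  else
    (extents, s + 1, missing)

def reordering_extents (seq_nrs : List Int) : List (Int × Int) :=
  match seq_nrs with
  | [] => []   -- unreachable under Pre_ (Python raises IndexError)
  | first :: rest =>
      (((PySem.List.enumerate rest).foldl pvStepA
          (PySem.Dict.empty, first + 1, (∅ : Std.HashMap Int Int))).1).items

-- ===== PORT B =====
-- first interval (lo, hi, v) with lo ≤ k < hi, newest first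
def pvLookup (k : Int) (ivs : List (Int × Int × Int)) : Option Int :=
  (ivs.find? (fun t => decide (t.1 ≤ k ∧ k < t.2.1))).map (fun t => t.2.2)

-- remove the single point s from every interval (splitting it)
def pvSplit (s : Int) (ivs : List (Int × Int × Int)) : List (Int × Int × Int) :=
  ivs.flatMap (fun t =>
    if t.1 ≤ s ∧ s < t.2.1 then
      (if t.1 < s then [(t.1, s, t.2.2)] else []) ++
      (if s + 1 < t.2.1 then [(s + 1, t.2.1, t.2.2)] else [])
    else [t])

def pvStepB (st : PySem.Dict Int Int × Int × List (Int × Int × Int)) (p : Int × Int) :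
    PySem.Dict Int Int × Int × List (Int × Int × Int) :=
  let extents := st.1
  let nxt := st.2.1
  let ivs := st.2.2
  let i := p.1
  let s := p.2
  if nxt < s then
    (extents, s + 1, (nxt, s, i) :: ivs)
  else
    match pvLookup s ivs with
    | none => (extents, s + 1, ivs)
    | some v => (extents.insert s (i - v), nxt, pvSplit s ivs)

def reordering_extents_alt (seq_nrs : List Int) : List (Int × Int) :=
  match seq_nrs with
  | [] => []
  | first :: rest =>
      (((PySem.List.enumerate rest).foldl pvStepB
          (PySem.Dict.empty, first + 1, [])).1).items

-- ===== PRECONDITION & SPEC =====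
-- Pre_ excludes only the empty list, on which the Python A raises IndexError (seq_nrs[0]).
def Pre_reordering_extents (seq_nrs : List Int) : Prop := seq_nrs ≠ []
instance (seq_nrs : List Int) : Decidable (Pre_reordering_extents seq_nrs) := by
  unfold Pre_reordering_extents; infer_instance

def pvWitness_reordering_extents : List Int := [3, 5, 4]

def Spec_reordering_extents (seq_nrs : List Int) (out : List (Int × Int)) : Prop := out = reordering_extents_alt seq_nrs
instance (seq_nrs : List Int) (out : List (Int × Int)) : Decidable (Spec_reordering_extents seq_nrs out) := by unfold Spec_reordering_extents; infer_instance

-- ===== CLAIM (what is proved, stated in full; the proofs are below) =====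
def Claim_equal_reordering_extents : Prop := ∀ (seq_nrs : List Int), Dom_reordering_extents seq_nrs → Pre_reordering_extents seq_nrs → Spec_reordering_extents seq_nrs (reordering_extents seq_nrs)

-- ===== LEMMAS AND PROOFS =====

-- inserting every j ∈ [a, b) with value i into a dict, pointwise
theorem pv_rangeInsert_get? (a b i : Int) (m : Std.HashMap Int Int) (k : Int) :
    ((PySem.List.pyRange a b 1).foldl (fun m j => m.insert j i) m)[k]?
      = if a ≤ k ∧ k < b then some i else m[k]? := by
  by_cases h : a < b
  · rw [PySem.List.pyRange_one_cons h, List.foldl_cons,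
        pv_rangeInsert_get? (a + 1) b i (m.insert a i) k,
        Std.HashMap.getElem?_insert]
    simp only [beq_iff_eq]
    split_ifs <;> first | rfl | omega
  · rw [PySem.List.pyRange_one_eq_nil (by omega)]
    rw [if_neg (by omega)]
    rfl
termination_by (b - a).toNat
decreasing_by omega

theorem pv_lookup_cons (a b v : Int) (ivs : List (Int × Int × Int)) (k : Int) :
    pvLookup k ((a, b, v) :: ivs) = if a ≤ k ∧ k < b then some v else pvLookup k ivs := by
  simp only [pvLookup, List.find?]
  by_cases h : a ≤ k ∧ k < b <;> simp [h]

theorem pv_lookup_append (k : Int) (xs ys : List (Int × Int × Int)) :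
    pvLookup k (xs ++ ys) = (pvLookup k xs).or (pvLookup k ys) := by
  simp only [pvLookup, List.find?_append]
  cases List.find? (fun t => decide (t.1 ≤ k ∧ k < t.2.1)) xs <;> rfl

theorem pv_lookup_pieces (lo hi v s k : Int) (hc : lo ≤ s ∧ s < hi) :
    pvLookup k ((if lo < s then [(lo, s, v)] else []) ++
                (if s + 1 < hi then [(s + 1, hi, v)] else []))
      = if lo ≤ k ∧ k < hi ∧ k ≠ s then some v else none := by
  rw [pv_lookup_append]
  by_cases hlo : lo < s <;> by_cases hhi : s + 1 < hi <;>
    simp only [hlo, hhi, if_pos, if_neg, pv_lookup_cons, not_false_iff] <;>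
    simp only [pvLookup, List.find?_nil, Option.map_none] <;>
    split_ifs <;> simp_all <;> omega

theorem pv_lookup_split (s : Int) (ivs : List (Int × Int × Int)) (k : Int) :
    pvLookup k (pvSplit s ivs) = if k = s then none else pvLookup k ivs := by
  induction ivs with
  | nil =>
      simp only [pvSplit, List.flatMap_nil, pvLookup, List.find?_nil, Option.map_none]
      split_ifs <;> rfl
  | cons t rest ih =>
      obtain ⟨lo, hi, v⟩ := t
      rw [show pvSplit s ((lo, hi, v) :: rest)
            = (if lo ≤ s ∧ s < hi then
                 (if lo < s then [(lo, s, v)] else []) ++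
                 (if s + 1 < hi then [(s + 1, hi, v)] else [])
               else [(lo, hi, v)]) ++ pvSplit s rest from rfl]
      rw [pv_lookup_append, ih]
      by_cases hc : lo ≤ s ∧ s < hi
      · rw [if_pos hc, pv_lookup_pieces lo hi v s k hc, pv_lookup_cons]
        by_cases hk : k = s
        · rw [if_neg (by omega), if_pos hk, if_pos hk]
          rfl
        · rw [if_neg hk, if_neg hk]
          by_cases hin : lo ≤ k ∧ k < hi
          · rw [if_pos (by exact ⟨hin.1, hin.2, hk⟩), if_pos hin]
            rfl
          · rw [if_neg (by omega), if_neg hin]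
            rfl
      · rw [if_neg hc, pv_lookup_cons (ivs := []), pv_lookup_cons]
        by_cases hk : k = s
        · rw [if_pos hk, if_pos hk, if_neg (by omega)]
          rfl
        · rw [if_neg hk, if_neg hk]
          by_cases hin : lo ≤ k ∧ k < hi
          · rw [if_pos hin, if_pos hin]
            rfl
          · rw [if_neg hin, if_neg hin]
            rfl

theorem pv_loop_rel (l : List (Int × Int)) :
    ∀ (e : PySem.Dict Int Int) (n : Int) (m : Std.HashMap Int Int)
      (ivs : List (Int × Int × Int)),
      (∀ k, m[k]? = pvLookup k ivs) →
      (l.foldl pvStepA (e, n, m)).1 = (l.foldl pvStepB (e, n, ivs)).1 := by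
  induction l with
  | nil => intro e n m ivs _; rfl
  | cons p l ih =>
      intro e n m ivs hrel
      obtain ⟨i, s⟩ := p
      simp only [List.foldl_cons]
      by_cases h1 : n < s
      · have hA : pvStepA (e, n, m) (i, s)
            = (e, s + 1, (PySem.List.pyRange n s 1).foldl (fun m j => m.insert j i) m) := by
          simp [pvStepA, h1]
        have hB : pvStepB (e, n, ivs) (i, s) = (e, s + 1, (n, s, i) :: ivs) := by
          simp [pvStepB, h1]
        rw [hA, hB]
        apply ih
        intro k
        rw [pv_rangeInsert_get?, pv_lookup_cons]
        by_cases hk : n ≤ k ∧ k < s <;> simp [hk, hrel k]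
      · by_cases h2 : m.contains s
        · have hsome : (m[s]?).isSome := by
            rw [← Std.HashMap.contains_eq_isSome_getElem?]; exact h2
          obtain ⟨v, hv⟩ := Option.isSome_iff_exists.mp hsome
          have hlook : pvLookup s ivs = some v := by rw [← hrel s]; exact hv
          have hgetD : m.getD s 0 = v := by
            rw [Std.HashMap.getD_eq_getD_getElem?, hv]; rfl
          have hA : pvStepA (e, n, m) (i, s)
              = (e.insert s (i - v), n, m.erase s) := by
            simp [pvStepA, h1, h2, hgetD]
          have hB : pvStepB (e, n, ivs) (i, s)
              = (e.insert s (i - v), n, pvSplit s ivs) := by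
            simp [pvStepB, h1, hlook]
          rw [hA, hB]
          apply ih
          intro k
          rw [Std.HashMap.getElem?_erase, pv_lookup_split]
          simp only [beq_iff_eq]
          by_cases hk : k = s
          · simp [hk]
          · simp [hk, Ne.symm hk, hrel k]
        · have hnone : m[s]? = none := by
            cases hval : m[s]? with
            | none => rfl
            | some v =>
                exfalso
                have : (m[s]?).isSome := by simp [hval]
                rw [← Std.HashMap.contains_eq_isSome_getElem?] at this
                exact h2 this
          have hlook : pvLookup s ivs = none := by rw [← hrel s]; exact hnone
          have hA : pvStepA (e, n, m) (i, s) = (e, s + 1, m) := by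
            simp [pvStepA, h1, h2]
          have hB : pvStepB (e, n, ivs) (i, s) = (e, s + 1, ivs) := by
            simp [pvStepB, h1, hlook]
          rw [hA, hB]
          exact ih _ _ _ _ hrel

-- ===== VERDICT (by name: the statement is the Claim_ definition above) =====
theorem reordering_extents_spec : Claim_equal_reordering_extents := by
  intro seq_nrs _ hpre
  unfold Spec_reordering_extents
  match seq_nrs with
  | [] => exact absurd rfl hpre
  | first :: rest =>
      have hA : reordering_extents (first :: rest)
          = (((PySem.List.enumerate rest).foldl pvStepA
              (PySem.Dict.empty, first + 1, (∅ : Std.HashMap Int Int))).1).items := rfl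
      have hB : reordering_extents_alt (first :: rest)
          = (((PySem.List.enumerate rest).foldl pvStepB
              (PySem.Dict.empty, first + 1, [])).1).items := rfl
      rw [hA, hB,
          pv_loop_rel (PySem.List.enumerate rest) PySem.Dict.empty (first + 1)
            (∅ : Std.HashMap Int Int) []
            (by intro k; simp [pvLookup])]
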